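-- pv_equiv track=rewrite | github.com/Zaargh/reddit_dailyprogrammer | splurthian_chemistry/splurth.py | list_all_symbols_for_element
-- ===== SOURCE A (Python) =====
-- import itertools
--
-- def list_all_symbols_for_element(name):
--     """
--     Creates list of all valid symbols for an element
--     :param name: Element name
--     :return: List of all valid symbols (unsorted)
--     """
--
--     if len(name) < 2:
--         raise ValueError('Element name must be at least 2 chars long')
--
--     result = set()
--     for i, _ in enumerate(name, start=0):
--         for pair in itertools.product(name[:i], name[i:]):
--             result.add(''.join(pair).capitalize())
--     return result
-- ===== SOURCE B (Python) =====
-- import itertools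
--
--
-- def list_all_symbols_for_element(name):
--     """
--     Creates list of all valid symbols for an element
--     :param name: Element name
--     :return: List of all valid symbols (unsorted)
--     """
--     if len(name) < 2:
--         raise ValueError('Element name must be at least 2 chars long')
--
--     return {(x + y).capitalize() for x, y in itertools.combinations(name, 2)}
-- ===== Notes on version B (the rewrite author's own statement) =====
-- stated objective: faster
-- what changed: Replaces the triple-nested scan (outer index i, product of prefix name[:i] with suffix name[i:], each position pair revisited for many i) by a single pass over itertools.combinations(name, 2), which visits every ordered position pair exactly once.
import Mathlib
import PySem

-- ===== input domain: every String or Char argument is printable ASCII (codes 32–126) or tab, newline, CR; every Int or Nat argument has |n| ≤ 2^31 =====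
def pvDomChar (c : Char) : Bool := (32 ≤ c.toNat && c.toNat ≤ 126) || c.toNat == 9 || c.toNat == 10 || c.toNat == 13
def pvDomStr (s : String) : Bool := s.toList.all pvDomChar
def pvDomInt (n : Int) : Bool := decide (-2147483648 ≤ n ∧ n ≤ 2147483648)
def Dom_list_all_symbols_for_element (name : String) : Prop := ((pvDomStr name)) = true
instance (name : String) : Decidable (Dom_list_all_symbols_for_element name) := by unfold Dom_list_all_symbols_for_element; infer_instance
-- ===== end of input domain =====

-- B replaces A's triple-nested prefix×suffix scan (each position pair revisited for many i)
-- by a single pass over itertools.combinations(name, 2), visiting every ordered position pair once.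


-- ===== PORT A =====
-- ''.join(pair).capitalize() on a 2-char string: first char title-cased, second lower-cased
-- (exact on ASCII, where Python's title-casing of a single char equals upper-casing).
def pvMkSym (x y : Char) : String :=
  String.mk [PySem.Chars.upperChar x, PySem.Chars.lowerChar y]

-- 'for i, _ in enumerate(name, start=0)' iterates i over 0..len(name)-1 (the char is unused);
-- name[:i] / name[i:] with this nonnegative in-range i are exactly take i / drop i;
-- itertools.product(prefix, suffix) is the flatMap below, in product's order.
def list_all_symbols_for_element (name : String) : List String :=
  let s := name.toList
  (List.range s.length).foldl
    (fun (result : PySem.Set String) i =>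
      ((s.take i).flatMap (fun x => (s.drop i).map (fun y => (x, y)))).foldl
        (fun r p => PySem.Set.add r (pvMkSym p.1 p.2)) result)
    PySem.Set.empty

-- ===== PORT B =====
-- itertools.combinations(xs, 2), in itertools' order.
def pvCombinations2 : List Char → List (Char × Char)
  | [] => []
  | x :: xs => (xs.map (fun y => (x, y))) ++ pvCombinations2 xs

-- the set comprehension {(x + y).capitalize() for x, y in itertools.combinations(name, 2)}
def list_all_symbols_for_element_alt (name : String) : List String :=
  PySem.Set.ofList ((pvCombinations2 name.toList).map (fun p => pvMkSym p.1 p.2))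

-- ===== PRECONDITION & SPEC =====
-- A raises ValueError exactly when len(name) < 2; exactly those inputs are excluded.
def Pre_list_all_symbols_for_element (name : String) : Prop := 2 ≤ PySem.Str.len name
instance (name : String) : Decidable (Pre_list_all_symbols_for_element name) := by
  unfold Pre_list_all_symbols_for_element; infer_instance
def pvWitness_list_all_symbols_for_element : String := "He"

def Spec_list_all_symbols_for_element (name : String) (out : List String) : Prop := out = list_all_symbols_for_element_alt name
instance (name : String) (out : List String) : Decidable (Spec_list_all_symbols_for_element name out) := by unfold Spec_list_all_symbols_for_element; infer_instance

-- ===== CLAIM (what is proved, stated in full; the proofs are below) =====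
def Claim_equal_list_all_symbols_for_element : Prop := ∀ (name : String), Dom_list_all_symbols_for_element name → Pre_list_all_symbols_for_element name → Spec_list_all_symbols_for_element name (list_all_symbols_for_element name)

-- ===== LEMMAS AND PROOFS =====

-- proof-only abbreviation: the strings of A's i-th block (prefix × suffix pairs)
def pvBlock (s : List Char) (i : Nat) : List String :=
  ((s.take i).flatMap (fun x => (s.drop i).map (fun y => (x, y)))).map (fun p => pvMkSym p.1 p.2)

theorem pv_block_zero (s : List Char) : pvBlock s 0 = [] := by simp [pvBlock]

theorem pv_block_succ_cons (x : Char) (u : List Char) (i : Nat) :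
    pvBlock (x :: u) (i + 1)
      = (u.drop i).map (fun y => pvMkSym x y) ++ pvBlock u i := by
  simp [pvBlock, List.take_succ_cons, List.drop_succ_cons, Function.comp_def]

-- updating with elements already present is a no-op
theorem pv_update_of_subset (r : PySem.Set String) (L : List String)
    (h : ∀ a ∈ L, a ∈ r) : PySem.Set.update r L = r := by
  rw [PySem.Set.update_eq_append_filter]
  have hnil : (PySem.Set.ofList L).filter (fun y => !(PySem.Set.contains r y)) = [] := by
    rw [List.filter_eq_nil_iff]
    intro a ha
    simpa using h a ((PySem.Set.mem_ofList L a).mp ha)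
  rw [hnil, List.append_nil]

-- once the full x-row is in the state, the partial x-rows of the later blocks are absorbed
theorem pv_absorb_rows (x : Char) (u : List Char) (I : List Nat) (r : PySem.Set String)
    (h : ∀ a ∈ u.map (fun y => pvMkSym x y), a ∈ r) :
    I.foldl (fun r i =>
        PySem.Set.update (PySem.Set.update r ((u.drop i).map (fun y => pvMkSym x y))) (pvBlock u i)) r
    = I.foldl (fun r i => PySem.Set.update r (pvBlock u i)) r := by
  induction I generalizing r with
  | nil => rfl
  | cons i I ih =>
    simp only [List.foldl_cons]
    rw [pv_update_of_subset r ((u.drop i).map (fun y => pvMkSym x y))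
      (by intro a ha
          apply h
          simp only [List.mem_map] at ha ⊢
          obtain ⟨y, hy, rfl⟩ := ha
          exact ⟨y, List.mem_of_mem_drop hy, rfl⟩)]
    exact ih _ (fun a ha => (PySem.Set.mem_update _ _ a).mpr (Or.inl (h a ha)))

-- A's block fold equals one update with B's combinations stream
theorem pv_main (t : List Char) (r : PySem.Set String) :
    (List.range t.length).foldl (fun r i => PySem.Set.update r (pvBlock t i)) r
    = PySem.Set.update r ((pvCombinations2 t).map (fun p => pvMkSym p.1 p.2)) := by
  induction t generalizing r with
  | nil => simp [pvCombinations2, PySem.Set.update_nil]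
  | cons x u ih =>
    simp only [List.length_cons, List.range_succ_eq_map, List.foldl_cons, List.foldl_map,
      pv_block_zero, PySem.Set.update_nil]
    have hstep : (fun (r : PySem.Set String) (i : Nat) =>
          PySem.Set.update r (pvBlock (x :: u) (i + 1)))
        = (fun (r : PySem.Set String) (i : Nat) =>
          PySem.Set.update (PySem.Set.update r ((u.drop i).map (fun y => pvMkSym x y))) (pvBlock u i)) := by
      funext r i
      rw [pv_block_succ_cons, PySem.Set.update_append]
    simp only [Nat.succ_eq_add_one, hstep]
    have hrhs : PySem.Set.update r ((pvCombinations2 (x :: u)).map (fun p => pvMkSym p.1 p.2))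
        = PySem.Set.update (PySem.Set.update r (u.map (fun y => pvMkSym x y)))
            ((pvCombinations2 u).map (fun p => pvMkSym p.1 p.2)) := by
      rw [show pvCombinations2 (x :: u) = (u.map (fun y => (x, y))) ++ pvCombinations2 u from rfl,
        List.map_append, PySem.Set.update_append, List.map_map]
      rfl
    rw [hrhs]
    cases u with
    | nil => simp [pvCombinations2, PySem.Set.update_nil]
    | cons c v =>
      simp only [List.length_cons, List.range_succ_eq_map, List.foldl_cons, List.drop_zero,
        pv_block_zero, PySem.Set.update_nil]
      rw [pv_absorb_rows x (c :: v) _ _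
        (fun a ha => (PySem.Set.mem_update _ _ a).mpr (Or.inr ha))]
      have := ih (PySem.Set.update r ((c :: v).map (fun y => pvMkSym x y)))
      simpa only [List.length_cons, List.range_succ_eq_map, List.foldl_cons,
        pv_block_zero, PySem.Set.update_nil] using this

-- ===== VERDICT (by name: the statement is the Claim_ definition above) =====
theorem list_all_symbols_for_element_spec : Claim_equal_list_all_symbols_for_element := by
  intro name _ _
  unfold Spec_list_all_symbols_for_element
  unfold list_all_symbols_for_element list_all_symbols_for_element_alt
  simp only [← PySem.Set.update_map_eq_foldl_add]
  have := pv_main name.toList PySem.Set.empty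
  simp only [pvBlock] at this
  rw [this]
  simp [PySem.Set.empty, PySem.Set.update_nil_left]
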